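-- pv_equiv track=rewrite | github.com/Solcast/solcast-api-csharp-sdk | generate_sdk_csharp.py | generate_csharp_class_with_usings
-- ===== SOURCE A (Python) =====
-- def generate_csharp_class_with_usings(class_name, methods, required_usings):
--     """Generates a C# class that contains multiple methods and the necessary 'using' statements."""
--
--     # Combine necessary usings into the header
--     usings = "\n".join([f"using {u};" for u in order_namespaces(required_usings)])
--
--     class_template = f"""
-- {usings}
--
-- namespace Solcast.Clients
-- {{
--     public class {class_name} : BaseClient
--     {{
--         public {class_name}()
--         {{
--         }}
-- {methods}    }}
-- }}
-- """
--     return class_template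
--
-- def order_namespaces(namespaces, app_namespace="Solcast"):
--     """
--     Orders a set of namespaces according to the recommended sequence:
--     1. System namespaces
--     2. Third-party namespaces (non-System, non-application specific)
--     3. Application-specific namespaces
--     4. Alias and static using directives (handled separately)
--
--     Args:
--         namespaces (set): A set of namespace strings.
--
--     Returns:
--         list: An ordered list of namespaces.
--     """
--     # Separate namespaces into categories
--     system_namespace = [ns for ns in namespaces if ns == "System"]
--     system_namespaces = sorted([ns for ns in namespaces if ns.startswith("System.")])
--     third_party_namespaces = sorted([ns for ns in namespaces if not ns.startswith("System") and not ns.startswith(app_namespace)])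
--     app_specific_namespaces = sorted([ns for ns in namespaces if ns.startswith(app_namespace)])
--     alias_and_static = sorted([ns for ns in namespaces if "static" in ns or "=" in ns])
--
--     # Combine all categories in the recommended order
--     ordered_namespaces = system_namespace + system_namespaces + \
--         third_party_namespaces + app_specific_namespaces + alias_and_static
--
--     return ordered_namespaces
-- ===== SOURCE B (Python) =====
-- def order_namespaces(namespaces, app_namespace="Solcast"):
--     # Decorate-sort-undecorate: tag each namespace with the rank of every
--     # category it belongs to, sort the (rank, name) pairs once globally,
--     # then drop the tags.  One composite-key sort replaces five bucket sorts.
--     tagged = []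
--     for ns in namespaces:
--         if ns == "System":
--             tagged.append((0, ns))
--         if ns.startswith("System."):
--             tagged.append((1, ns))
--         if not ns.startswith("System") and not ns.startswith(app_namespace):
--             tagged.append((2, ns))
--         if ns.startswith(app_namespace):
--             tagged.append((3, ns))
--         if "static" in ns or "=" in ns:
--             tagged.append((4, ns))
--     tagged.sort()
--     return [ns for _, ns in tagged]
--
--
-- def generate_csharp_class_with_usings(class_name, methods, required_usings):
--     """Generates a C# class that contains multiple methods and the necessary 'using' statements."""
--     usings = "\n".join("using %s;" % u for u in order_namespaces(required_usings))
--     return (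
--         "\n" + usings + "\n\nnamespace Solcast.Clients\n{\n"
--         "    public class " + class_name + " : BaseClient\n    {\n"
--         "        public " + class_name + "()\n        {\n        }\n"
--         + methods + "    }\n}\n"
--     )
-- ===== Notes on version B (the rewrite author's own statement) =====
-- stated objective: alternative
-- what changed: order_namespaces is rewritten as decorate-sort-undecorate: each namespace is tagged with the rank of every category it matches, the (rank, name) pairs are sorted once globally by the composite key, and the tags are dropped, replacing A's five filtered-and-individually-sorted bucket lists.
import Mathlib
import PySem

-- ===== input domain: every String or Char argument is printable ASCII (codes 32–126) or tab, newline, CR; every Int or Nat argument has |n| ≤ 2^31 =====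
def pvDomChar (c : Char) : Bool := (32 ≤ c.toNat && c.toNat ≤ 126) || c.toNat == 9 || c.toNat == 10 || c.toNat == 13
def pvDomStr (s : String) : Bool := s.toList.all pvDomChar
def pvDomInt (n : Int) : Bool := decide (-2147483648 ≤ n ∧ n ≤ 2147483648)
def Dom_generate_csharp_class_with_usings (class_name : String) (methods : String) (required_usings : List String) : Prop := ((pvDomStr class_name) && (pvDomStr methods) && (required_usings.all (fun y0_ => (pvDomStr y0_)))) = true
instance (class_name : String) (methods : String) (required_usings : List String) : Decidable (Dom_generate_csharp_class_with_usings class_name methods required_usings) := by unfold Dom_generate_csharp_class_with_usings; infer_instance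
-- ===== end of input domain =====

-- B replaces order_namespaces' five filtered-and-sorted bucket lists by decorate-sort-undecorate:
-- tag each namespace with the rank of every matching category, sort the (rank, name) pairs once
-- globally, drop the tags; same output, a different algorithm (one composite-key sort).

-- ===== PORT A =====
-- A's order_namespaces: five filtered comprehensions, four of them sorted, concatenated.
def pvOrderNamespacesA (namespaces : List String) (app_namespace : String) : List String :=
  let system_namespace := namespaces.filter (fun ns => ns == "System")
  let system_namespaces := PySem.List.sorted (namespaces.filter (fun ns => PySem.Str.startswith ns "System.")) (fun x => x)
  let third_party_namespaces := PySem.List.sorted (namespaces.filter (fun ns => !PySem.Str.startswith ns "System" && !PySem.Str.startswith ns app_namespace)) (fun x => x)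
  let app_specific_namespaces := PySem.List.sorted (namespaces.filter (fun ns => PySem.Str.startswith ns app_namespace)) (fun x => x)
  let alias_and_static := PySem.List.sorted (namespaces.filter (fun ns => PySem.Str.isIn "static" ns || PySem.Str.isIn "=" ns)) (fun x => x)
  system_namespace ++ system_namespaces ++ third_party_namespaces ++ app_specific_namespaces ++ alias_and_static

def generate_csharp_class_with_usings (class_name : String) (methods : String) (required_usings : List String) : String :=
  let usings := PySem.Str.join "\n" ((pvOrderNamespacesA required_usings "Solcast").map (fun u => "using " ++ u ++ ";"))
  "\n" ++ usings ++ "\n\nnamespace Solcast.Clients\n{\n    public class " ++ class_name ++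
    " : BaseClient\n    {\n        public " ++ class_name ++ "()\n        {\n        }\n" ++
    methods ++ "    }\n}\n"

-- ===== PORT B =====
-- the loop body of Source B: append a (rank, ns) pair for every category test that matches
def pvTagStep (app_namespace : String) (tagged : List (Int × String)) (ns : String) : List (Int × String) :=
  let tagged := if ns == "System" then tagged ++ [((0 : Int), ns)] else tagged
  let tagged := if PySem.Str.startswith ns "System." then tagged ++ [((1 : Int), ns)] else tagged
  let tagged := if !PySem.Str.startswith ns "System" && !PySem.Str.startswith ns app_namespace then tagged ++ [((2 : Int), ns)] else tagged
  let tagged := if PySem.Str.startswith ns app_namespace then tagged ++ [((3 : Int), ns)] else tagged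
  if PySem.Str.isIn "static" ns || PySem.Str.isIn "=" ns then tagged ++ [((4 : Int), ns)] else tagged

def pvOrderNamespacesB (namespaces : List String) (app_namespace : String) : List String :=
  let tagged := namespaces.foldl (pvTagStep app_namespace) []
  (PySem.List.sorted2 tagged (fun t => t.1) (fun t => t.2)).map (fun t => t.2)

def generate_csharp_class_with_usings_alt (class_name : String) (methods : String) (required_usings : List String) : String :=
  let usings := PySem.Str.join "\n" ((pvOrderNamespacesB required_usings "Solcast").map (fun u => "using " ++ u ++ ";"))
  "\n" ++ usings ++ "\n\nnamespace Solcast.Clients\n{\n    public class " ++ class_name ++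
    " : BaseClient\n    {\n        public " ++ class_name ++ "()\n        {\n        }\n" ++
    methods ++ "    }\n}\n"

-- ===== PRECONDITION & SPEC =====
def Spec_generate_csharp_class_with_usings (class_name : String) (methods : String) (required_usings : List String) (out : String) : Prop := out = generate_csharp_class_with_usings_alt class_name methods required_usings
instance (class_name : String) (methods : String) (required_usings : List String) (out : String) : Decidable (Spec_generate_csharp_class_with_usings class_name methods required_usings out) := by unfold Spec_generate_csharp_class_with_usings; infer_instance

-- ===== CLAIM (what is proved, stated in full; the proofs are below) =====
def Claim_equal_generate_csharp_class_with_usings : Prop := ∀ (class_name : String) (methods : String) (required_usings : List String), Dom_generate_csharp_class_with_usings class_name methods required_usings → Spec_generate_csharp_class_with_usings class_name methods required_usings (generate_csharp_class_with_usings class_name methods required_usings)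

-- ===== LEMMAS AND PROOFS =====

-- the five category tests and the per-namespace tag list
def pvP0 (ns : String) : Bool := ns == "System"
def pvP1 (ns : String) : Bool := PySem.Str.startswith ns "System."
def pvP2 (app : String) (ns : String) : Bool := !PySem.Str.startswith ns "System" && !PySem.Str.startswith ns app
def pvP3 (app : String) (ns : String) : Bool := PySem.Str.startswith ns app
def pvP4 (ns : String) : Bool := PySem.Str.isIn "static" ns || PySem.Str.isIn "=" ns

def pvTags (app ns : String) : List (Int × String) :=
  (if pvP0 ns then [((0 : Int), ns)] else []) ++ (if pvP1 ns then [((1 : Int), ns)] else []) ++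
  (if pvP2 app ns then [((2 : Int), ns)] else []) ++ (if pvP3 app ns then [((3 : Int), ns)] else []) ++
  (if pvP4 ns then [((4 : Int), ns)] else [])

-- the comparison sorted2 uses, and the strict lexicographic order it decides
def pvLexBefore (a b : Int × String) : Bool :=
  decide (a.1 < b.1) || (!decide (b.1 < a.1) && decide (a.2 < b.2))

def pvLexP (a b : Int × String) : Prop := a.1 < b.1 ∨ (a.1 = b.1 ∧ a.2 < b.2)

def pvR (a b : Int × String) : Prop := pvLexBefore b a = false

theorem pvLexBefore_iff (a b : Int × String) : pvLexBefore a b = true ↔ pvLexP a b := by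
  simp only [pvLexBefore, pvLexP, Bool.or_eq_true, Bool.and_eq_true, Bool.not_eq_true',
    decide_eq_true_eq, decide_eq_false_iff_not]
  constructor
  · rintro (h | ⟨h1, h2⟩)
    · exact Or.inl h
    · rcases lt_trichotomy a.1 b.1 with h' | h' | h'
      · exact Or.inl h'
      · exact Or.inr ⟨h', h2⟩
      · exact absurd h' h1
  · rintro (h | ⟨h1, h2⟩)
    · exact Or.inl h
    · exact Or.inr ⟨by omega, h2⟩

theorem pvLexBefore_eq_false_iff (a b : Int × String) : pvLexBefore a b = false ↔ ¬ pvLexP a b := by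
  rw [← pvLexBefore_iff]; simp

theorem pvLexP_trans {a b c : Int × String} (h1 : pvLexP a b) (h2 : pvLexP b c) : pvLexP a c := by
  rcases h1 with h1 | ⟨e1, s1⟩ <;> rcases h2 with h2 | ⟨e2, s2⟩
  · exact Or.inl (lt_trans h1 h2)
  · exact Or.inl (by omega)
  · exact Or.inl (by omega)
  · exact Or.inr ⟨by omega, lt_trans s1 s2⟩

theorem pvLexP_irrefl (a : Int × String) : ¬ pvLexP a a := by
  rintro (h | ⟨_, h⟩) <;> exact lt_irrefl _ h

theorem pvLexP_trichotomy (a b : Int × String) : pvLexP a b ∨ a = b ∨ pvLexP b a := by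
  rcases lt_trichotomy a.1 b.1 with h | h | h
  · exact Or.inl (Or.inl h)
  · rcases lt_trichotomy a.2 b.2 with h' | h' | h'
    · exact Or.inl (Or.inr ⟨h, h'⟩)
    · exact Or.inr (Or.inl (Prod.ext h h'))
    · exact Or.inr (Or.inr (Or.inr ⟨h.symm, h'⟩))
  · exact Or.inr (Or.inr (Or.inl h))

theorem pvR_trans {a b c : Int × String} (h1 : pvR a b) (h2 : pvR b c) : pvR a c := by
  rw [pvR, pvLexBefore_eq_false_iff] at *
  intro h
  rcases pvLexP_trichotomy c b with h' | h' | h'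
  · exact h2 h'
  · exact h1 (h' ▸ h)
  · exact h1 (pvLexP_trans h' h)

theorem pvR_of_before {x y : Int × String} (h : pvLexBefore x y = true) : pvR x y := by
  rw [pvLexBefore_iff] at h
  rw [pvR, pvLexBefore_eq_false_iff]
  intro h'
  exact pvLexP_irrefl x (pvLexP_trans h h')

theorem pvR_antisymm {a b : Int × String} (h1 : pvR a b) (h2 : pvR b a) : a = b := by
  rw [pvR, pvLexBefore_eq_false_iff] at h1 h2
  rcases pvLexP_trichotomy a b with h | h | h
  · exact absurd h h2
  · exact h
  · exact absurd h h1

-- insertion with pvLexBefore preserves pvR-sortedness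
theorem pvInsertBy_sorted {x : Int × String} {l : List (Int × String)} (h : l.Pairwise pvR) :
    (PySem.List.insertBy pvLexBefore x l).Pairwise pvR := by
  induction l with
  | nil =>
    rw [show PySem.List.insertBy pvLexBefore x [] = [x] from rfl]
    simp
  | cons y ys ih =>
    rw [List.pairwise_cons] at h
    obtain ⟨hy, hys⟩ := h
    by_cases hb : pvLexBefore x y = true
    · rw [show PySem.List.insertBy pvLexBefore x (y :: ys) = x :: y :: ys by
        simp [PySem.List.insertBy, hb]]
      rw [List.pairwise_cons]
      refine ⟨?_, by rw [List.pairwise_cons]; exact ⟨hy, hys⟩⟩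
      intro b hbmem
      rcases List.mem_cons.mp hbmem with rfl | hmem
      · exact pvR_of_before hb
      · exact pvR_trans (pvR_of_before hb) (hy b hmem)
    · rw [show PySem.List.insertBy pvLexBefore x (y :: ys) = y :: PySem.List.insertBy pvLexBefore x ys by
        simp [PySem.List.insertBy, hb]]
      rw [List.pairwise_cons]
      refine ⟨?_, ih hys⟩
      intro b hbmem
      rcases (PySem.List.mem_insertBy pvLexBefore x b ys).mp hbmem with rfl | hmem
      · exact Bool.eq_false_iff.mpr hb
      · exact hy b hmem

theorem pvFoldl_insertBy_sorted (xs : List (Int × String)) :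
    ∀ acc : List (Int × String), acc.Pairwise pvR →
      (xs.foldl (fun acc x => PySem.List.insertBy pvLexBefore x acc) acc).Pairwise pvR := by
  induction xs with
  | nil => intro acc h; exact h
  | cons x xs ih => intro acc h; exact ih _ (pvInsertBy_sorted h)

theorem pvSorted2_eq_foldl (xs : List (Int × String)) :
    PySem.List.sorted2 xs (fun t => t.1) (fun t => t.2) =
      xs.foldl (fun acc x => PySem.List.insertBy pvLexBefore x acc) [] := rfl

-- B's tag loop equals flatMap of the per-namespace tag lists
theorem pvTagStep_eq (app : String) (acc : List (Int × String)) (ns : String) :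
    pvTagStep app acc ns = acc ++ pvTags app ns := by
  simp only [pvTagStep, pvTags, pvP0, pvP1, pvP2, pvP3, pvP4]
  split_ifs <;> simp

theorem pvFoldl_tags (app : String) (l : List String) :
    ∀ acc, l.foldl (pvTagStep app) acc = acc ++ l.flatMap (pvTags app) := by
  induction l with
  | nil => intro acc; simp
  | cons x xs ih => intro acc; simp [pvTagStep_eq, ih, List.append_assoc]

-- the tagged list is a permutation of the five tagged filter buckets
theorem pvMap_if_cons (c : Prop) [Decidable c] (x : String) (L : List String) (f : String → Int × String) :
    ((if c then x :: L else L).map f) = (if c then [f x] else []) ++ L.map f := by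
  split <;> simp

theorem pvTags_perm (app : String) (l : List String) :
    (l.flatMap (pvTags app)).Perm
      ((l.filter pvP0).map (fun s => ((0 : Int), s)) ++ (l.filter pvP1).map (fun s => ((1 : Int), s)) ++
       (l.filter (pvP2 app)).map (fun s => ((2 : Int), s)) ++ (l.filter (pvP3 app)).map (fun s => ((3 : Int), s)) ++
       (l.filter pvP4).map (fun s => ((4 : Int), s))) := by
  induction l with
  | nil => simp
  | cons x xs ih =>
    rw [← Multiset.coe_eq_coe] at *
    simp only [List.flatMap_cons, List.filter_cons, pvMap_if_cons, pvTags]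
    simp only [← Multiset.coe_add] at *
    rw [ih]
    abel

-- sortedness of the five-bucket concatenation
theorem pvSorted_map_mk (k : Int) (L : List String) (h : L.Pairwise (· ≤ ·)) :
    (L.map (fun s => (k, s))).Pairwise pvR := by
  rw [List.pairwise_map]
  refine h.imp ?_
  intro a b hab
  rw [pvR, pvLexBefore_eq_false_iff]
  rintro (h' | ⟨_, h'⟩)
  · exact lt_irrefl _ h'
  · exact absurd h' (not_lt.mpr hab)

theorem pvCross {j k : Int} (hjk : j < k) {a b : Int × String} {L M : List String}
    (ha : a ∈ L.map (fun s => (j, s))) (hb : b ∈ M.map (fun s => (k, s))) : pvR a b := by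
  obtain ⟨_, _, rfl⟩ := List.mem_map.mp ha
  obtain ⟨_, _, rfl⟩ := List.mem_map.mp hb
  rw [pvR, pvLexBefore_eq_false_iff]
  rintro (h | ⟨h, _⟩) <;> simp_all <;> omega

theorem pvFilter0_pairwise (l : List String) : (l.filter pvP0).Pairwise (· ≤ ·) := by
  have h : ∀ s ∈ l.filter pvP0, s = "System" := by
    intro s hs
    have := (List.mem_filter.mp hs).2
    simpa [pvP0] using this
  refine List.pairwise_of_forall_mem_list ?_
  intro a ha b hb
  rw [h a ha, h b hb]

-- the main fact: B's globally sorted tag list projects to A's bucket concatenation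
theorem pvOrder_eq (l : List String) (app : String) :
    pvOrderNamespacesB l app = pvOrderNamespacesA l app := by
  have hT :
      PySem.List.sorted2 (l.foldl (pvTagStep app) []) (fun t => t.1) (fun t => t.2) =
        (l.filter pvP0).map (fun s => ((0 : Int), s)) ++
        (PySem.List.sorted (l.filter pvP1) (fun x => x)).map (fun s => ((1 : Int), s)) ++
        (PySem.List.sorted (l.filter (pvP2 app)) (fun x => x)).map (fun s => ((2 : Int), s)) ++
        (PySem.List.sorted (l.filter (pvP3 app)) (fun x => x)).map (fun s => ((3 : Int), s)) ++
        (PySem.List.sorted (l.filter pvP4) (fun x => x)).map (fun s => ((4 : Int), s)) := by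
    refine List.Perm.eq_of_pairwise (fun a b _ _ h1 h2 => pvR_antisymm h1 h2) ?_ ?_ ?_
    case _ => -- B's side is sorted
      rw [pvSorted2_eq_foldl]
      exact pvFoldl_insertBy_sorted _ [] (by simp)
    case _ => -- the bucket concatenation is sorted
      have s0 := pvSorted_map_mk 0 _ (pvFilter0_pairwise l)
      have s1 := pvSorted_map_mk 1 _ (PySem.List.sorted_pairwise (l.filter pvP1) (fun x => x))
      have s2 := pvSorted_map_mk 2 _ (PySem.List.sorted_pairwise (l.filter (pvP2 app)) (fun x => x))
      have s3 := pvSorted_map_mk 3 _ (PySem.List.sorted_pairwise (l.filter (pvP3 app)) (fun x => x))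
      have s4 := pvSorted_map_mk 4 _ (PySem.List.sorted_pairwise (l.filter pvP4) (fun x => x))
      simp only [List.pairwise_append]
      refine ⟨⟨⟨⟨s0, s1, ?_⟩, s2, ?_⟩, s3, ?_⟩, s4, ?_⟩
      · intro a ha b hb; exact pvCross (by norm_num) ha hb
      · intro a ha b hb
        rcases List.mem_append.mp ha with h | h
        · exact pvCross (by norm_num) h hb
        · exact pvCross (by norm_num) h hb
      · intro a ha b hb
        rcases List.mem_append.mp ha with h | h
        · rcases List.mem_append.mp h with h' | h'
          · exact pvCross (by norm_num) h' hb
          · exact pvCross (by norm_num) h' hb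
        · exact pvCross (by norm_num) h hb
      · intro a ha b hb
        rcases List.mem_append.mp ha with h | h
        · rcases List.mem_append.mp h with h' | h'
          · rcases List.mem_append.mp h' with h'' | h''
            · exact pvCross (by norm_num) h'' hb
            · exact pvCross (by norm_num) h'' hb
          · exact pvCross (by norm_num) h' hb
        · exact pvCross (by norm_num) h hb
    case _ => -- permutation
      refine ((PySem.List.sorted2_perm (l.foldl (pvTagStep app) []) (fun t => t.1) (fun t => t.2) false).trans ?_)
      rw [pvFoldl_tags app l []]
      simp only [List.nil_append]
      refine (pvTags_perm app l).trans ?_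
      refine (((((List.Perm.refl _).append ?_).append ?_).append ?_).append ?_)
      all_goals exact ((PySem.List.sorted_perm _ _ _).map _).symm
  rw [show pvOrderNamespacesB l app =
        (PySem.List.sorted2 (l.foldl (pvTagStep app) []) (fun t => t.1) (fun t => t.2)).map
          (fun t => t.2) from rfl, hT]
  unfold pvP0 pvP1 pvP2 pvP3 pvP4
  simp [pvOrderNamespacesA, List.map_map, Function.comp_def]

-- ===== VERDICT (by name: the statement is the Claim_ definition above) =====
theorem generate_csharp_class_with_usings_spec : Claim_equal_generate_csharp_class_with_usings := by
  intro class_name methods required_usings _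
  unfold Spec_generate_csharp_class_with_usings generate_csharp_class_with_usings generate_csharp_class_with_usings_alt
  rw [pvOrder_eq]
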